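-- pv_equiv track=rewrite | github.com/acp18va/Named-Entity-Recognition-Sturctured-Perceptron | lab3.py | phi_2
-- ===== SOURCE A (Python) =====
-- from collections import Counter
--
-- def phi_2(sent, train_dict_phi_2):
--     # we add the None tag in beginning
--     sent = ['None_None'] + sent
--     # creating the list of tags
--     temp_tag = []
--     for key in sent:
--         p = key.split("_")
--         temp_tag.append(p[1])
--     # creating bigrams from temp_tag
--     n_grams = zip(*[temp_tag[i:] for i in range(2)])
--     bigram = ["_".join(n_gram) for n_gram in n_grams]
--     # counting the elements in bigram
--     count = Counter(bigram)
--     # making a new dictionary with the elements present in train_dict_phi_2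
--     dict = {}
--     for key, val in count.items():
--         if key in train_dict_phi_2.keys():
--             dict.update({key: val})
--     return dict
-- ===== SOURCE B (Python) =====
-- def phi_2(sent, train_dict_phi_2):
--     # Single pass: keep a running previous tag, form each bigram key directly,
--     # and count only keys present in train_dict_phi_2 (first-occurrence insertion order).
--     result = {}
--     prev = 'None'
--     for tok in sent:
--         cur = tok.split('_')[1]
--         key = '_'.join((prev, cur))
--         if key in train_dict_phi_2:
--             result[key] = result.get(key, 0) + 1
--         prev = cur
--     return result
-- ===== Notes on version B (the rewrite author's own statement) =====
-- stated objective: simpler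
-- what changed: Replaces A's five passes (prepend sentinel, tag-list loop, zip-based bigram list, Counter, filter loop) by one pass over the sentence with a running previous tag, incrementing a result dict only for bigrams present in train_dict_phi_2; no Counter or intermediate bigram list is built.
import Mathlib
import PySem

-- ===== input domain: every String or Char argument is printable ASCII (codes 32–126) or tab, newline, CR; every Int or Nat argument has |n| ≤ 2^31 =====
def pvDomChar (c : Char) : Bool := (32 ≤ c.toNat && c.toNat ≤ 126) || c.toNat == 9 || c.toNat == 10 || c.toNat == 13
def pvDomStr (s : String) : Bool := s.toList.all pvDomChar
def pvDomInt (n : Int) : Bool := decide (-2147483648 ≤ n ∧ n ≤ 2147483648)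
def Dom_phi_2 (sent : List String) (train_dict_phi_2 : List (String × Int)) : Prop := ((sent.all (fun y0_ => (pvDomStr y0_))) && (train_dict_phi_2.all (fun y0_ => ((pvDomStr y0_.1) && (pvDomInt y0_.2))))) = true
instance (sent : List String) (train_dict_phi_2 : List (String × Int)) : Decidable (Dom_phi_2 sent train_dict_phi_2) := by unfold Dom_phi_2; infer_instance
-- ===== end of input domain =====

-- B replaces A's five passes (tag list, zip bigrams, Counter, filter loop) by one pass with a
-- running previous tag, counting only bigrams present in train_dict_phi_2 (objective: simpler).

-- ===== PORT A =====
def phi_2 (sent : List String) (train_dict_phi_2 : List (String × Int)) : List (String × Int) :=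
  -- sent = ['None_None'] + sent
  let sent2 := "None_None" :: sent
  -- temp_tag loop: p = key.split("_"); temp_tag.append(p[1])  (p[1] in range under Pre_)
  let temp_tag := sent2.foldl
    (fun acc key =>
      let p := (PySem.Str.split? key "_").getD []   -- split? is some (sep "_" ≠ "")
      acc ++ [(PySem.List.pyGet? p 1).getD ""]) ([] : List String)
  -- zip(*[temp_tag[i:] for i in range(2)]): pairs of consecutive elements (temp_tag[1:] = drop 1)
  let n_grams := temp_tag.zip (temp_tag.drop 1)
  let bigram := n_grams.map (fun n_gram => PySem.Str.join "_" [n_gram.1, n_gram.2])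
  let count := PySem.Dict.counter bigram
  -- filter loop: dict.update({key: val}) if key in train_dict_phi_2.keys()
  let d := count.items.foldl
    (fun (d : PySem.Dict String Int) kv =>
      if (train_dict_phi_2.map Prod.fst).contains kv.1 then d.insert kv.1 kv.2 else d)
    PySem.Dict.empty
  d.items

-- ===== PORT B =====
def phi_2_alt (sent : List String) (train_dict_phi_2 : List (String × Int)) : List (String × Int) :=
  -- single pass, state = (result, prev)
  let st := sent.foldl
    (fun (st : PySem.Dict String Int × String) tok =>
      let cur := (PySem.List.pyGet? ((PySem.Str.split? tok "_").getD []) 1).getD ""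
      let key := PySem.Str.join "_" [st.2, cur]
      if (train_dict_phi_2.map Prod.fst).contains key then
        (st.1.insert key (st.1.getD key 0 + 1), cur)
      else (st.1, cur))
    (PySem.Dict.empty, "None")
  st.1.items

-- ===== PRECONDITION & SPEC =====
-- Pre_ excludes exactly the inputs where A raises IndexError: a token with no '_' makes p[1] fail.
def Pre_phi_2 (sent : List String) (train_dict_phi_2 : List (String × Int)) : Prop :=
  ∀ tok ∈ sent, 2 ≤ ((PySem.Str.split? tok "_").getD []).length
instance (sent : List String) (train_dict_phi_2 : List (String × Int)) : Decidable (Pre_phi_2 sent train_dict_phi_2) := by unfold Pre_phi_2; infer_instance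

def pvWitness_phi_2 : List String × (List (String × Int)) :=
  (["a_A", "b_B", "c_A"], [("A_B", 2), ("None_A", 0)])

def Spec_phi_2 (sent : List String) (train_dict_phi_2 : List (String × Int)) (out : List (String × Int)) : Prop := out = phi_2_alt sent train_dict_phi_2
instance (sent : List String) (train_dict_phi_2 : List (String × Int)) (out : List (String × Int)) : Decidable (Spec_phi_2 sent train_dict_phi_2 out) := by unfold Spec_phi_2; infer_instance

-- ===== CLAIM (what is proved, stated in full; the proofs are below) =====
def Claim_equal_phi_2 : Prop := ∀ (sent : List String) (train_dict_phi_2 : List (String × Int)), Dom_phi_2 sent train_dict_phi_2 → Pre_phi_2 sent train_dict_phi_2 → Spec_phi_2 sent train_dict_phi_2 (phi_2 sent train_dict_phi_2)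

-- ===== LEMMAS AND PROOFS =====

-- the tag of a token, as both ports compute it
def pvTag (tok : String) : String :=
  (PySem.List.pyGet? ((PySem.Str.split? tok "_").getD []) 1).getD ""

-- the bigram strings of a tag list
def pvBigrams : List String → List String
  | t₁ :: t₂ :: rest => PySem.Str.join "_" [t₁, t₂] :: pvBigrams (t₂ :: rest)
  | _ => []

theorem pv_foldl_append_map (l : List String) (acc : List String) :
    l.foldl (fun a key => a ++ [pvTag key]) acc = acc ++ l.map pvTag := by
  induction l generalizing acc with
  | nil => simp
  | cons x xs ih => simp [List.foldl_cons, ih]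

theorem pv_zip_map_bigrams (ts : List String) :
    (ts.zip (ts.drop 1)).map (fun g => PySem.Str.join "_" [g.1, g.2]) = pvBigrams ts := by
  match ts with
  | [] => simp [pvBigrams]
  | [t] => simp [pvBigrams]
  | t₁ :: t₂ :: rest =>
    simp only [List.drop_one, List.tail_cons, List.zip_cons_cons, List.map_cons, pvBigrams]
    exact congrArg _ (by simpa using pv_zip_map_bigrams (t₂ :: rest))

theorem pv_foldl_if_filter_pairs (S : List String) (l : List (String × Int)) (d : PySem.Dict String Int) :
    l.foldl (fun d kv => if S.contains kv.1 then d.insert kv.1 kv.2 else d) d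
      = (l.filter (fun kv => S.contains kv.1)).foldl (fun d kv => d.insert kv.1 kv.2) d := by
  induction l generalizing d with
  | nil => rfl
  | cons x xs ih =>
    rw [List.foldl_cons, List.filter_cons]
    by_cases h : S.contains x.1 = true
    · rw [if_pos h, if_pos h, List.foldl_cons]
      exact ih _
    · rw [if_neg h, if_neg h]
      exact ih _

theorem pv_foldl_if_filter_keys (S : List String) (l : List String) (d : PySem.Dict String Int) :
    l.foldl (fun d k => if S.contains k then d.insert k (d.getD k 0 + 1) else d) d
      = (l.filter (fun k => S.contains k)).foldl (fun d k => d.insert k (d.getD k 0 + 1)) d := by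
  induction l generalizing d with
  | nil => rfl
  | cons x xs ih =>
    rw [List.foldl_cons, List.filter_cons]
    by_cases h : S.contains x = true
    · rw [if_pos h, if_pos h, List.foldl_cons]
      exact ih _
    · rw [if_neg h, if_neg h]
      exact ih _

theorem pv_add_of_contains (l : List String) (x : String) (h : l.contains x = true) :
    PySem.Set.add l x = l := by
  unfold PySem.Set.add PySem.Set.contains; rw [if_pos h]

theorem pv_add_of_not_contains (l : List String) (x : String) (h : l.contains x = false) :
    PySem.Set.add l x = l ++ [x] := by
  unfold PySem.Set.add PySem.Set.contains; rw [if_neg (by rw [h]; exact Bool.false_ne_true)]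

theorem pv_foldl_add_filter (p : String → Bool) (bs : List String) (s : List String) :
    List.foldl PySem.Set.add (s.filter p) (bs.filter p)
      = (List.foldl PySem.Set.add s bs).filter p := by
  induction bs generalizing s with
  | nil => rfl
  | cons x xs ih =>
    rw [List.filter_cons, List.foldl_cons]
    by_cases hm : x ∈ s
    · have hc : s.contains x = true := List.contains_iff_mem.mpr hm
      rw [pv_add_of_contains s x hc]
      by_cases h : p x = true
      · have hcf : (s.filter p).contains x = true :=
          List.contains_iff_mem.mpr (List.mem_filter.mpr ⟨hm, h⟩)
        rw [if_pos h, List.foldl_cons, pv_add_of_contains _ x hcf]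
        exact ih s
      · rw [if_neg h]
        exact ih s
    · have hc : s.contains x = false := by
        rw [← Bool.not_eq_true, List.contains_iff_mem]; exact hm
      rw [pv_add_of_not_contains s x hc]
      by_cases h : p x = true
      · have hcf : (s.filter p).contains x = false := by
          rw [← Bool.not_eq_true, List.contains_iff_mem]
          exact fun hx => hm (List.mem_filter.mp hx).1
        have hfa : (s ++ [x]).filter p = s.filter p ++ [x] := by
          rw [List.filter_append, List.filter_cons, if_pos h]; rfl
        rw [if_pos h, List.foldl_cons, pv_add_of_not_contains _ x hcf, ← hfa]
        exact ih (s ++ [x])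
      · have hfa : (s ++ [x]).filter p = s.filter p := by
          rw [List.filter_append, List.filter_cons, if_neg h]
          simp
        rw [if_neg h, ← hfa]
        exact ih (s ++ [x])

theorem pv_ofList_filter (p : String → Bool) (bs : List String) :
    PySem.Set.ofList (bs.filter p) = (PySem.Set.ofList bs).filter p := by
  simpa [PySem.Set.ofList, PySem.Set.empty] using pv_foldl_add_filter p bs []

-- the B-side loop threaded over the sentence equals the if-fold over the bigram list
theorem pv_b_loop (train_dict_phi_2 : List (String × Int)) (sent : List String)
    (d : PySem.Dict String Int) (prev : String) :
    (sent.foldl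
      (fun (st : PySem.Dict String Int × String) tok =>
        let cur := (PySem.List.pyGet? ((PySem.Str.split? tok "_").getD []) 1).getD ""
        let key := PySem.Str.join "_" [st.2, cur]
        if (train_dict_phi_2.map Prod.fst).contains key then
          (st.1.insert key (st.1.getD key 0 + 1), cur)
        else (st.1, cur)) (d, prev)).1
    = (pvBigrams (prev :: sent.map pvTag)).foldl
        (fun d k => if (train_dict_phi_2.map Prod.fst).contains k then
            d.insert k (d.getD k 0 + 1) else d) d := by
  induction sent generalizing d prev with
  | nil => rfl
  | cons tok rest ih =>
    have hdef : ∀ t : String,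
        (PySem.List.pyGet? ((PySem.Str.split? t "_").getD []) 1).getD "" = pvTag t :=
      fun _ => rfl
    simp only [hdef] at ih ⊢
    simp only [List.foldl_cons, List.map_cons, pvBigrams]
    by_cases h : (train_dict_phi_2.map Prod.fst).contains
        (PySem.Str.join "_" [prev, pvTag tok]) = true
    · rw [if_pos h, if_pos h]
      exact ih _ _
    · rw [if_neg h, if_neg h]
      exact ih _ _

-- common canonical value of both ports
theorem pv_a_canon (sent : List String) (train_dict_phi_2 : List (String × Int)) :
    phi_2 sent train_dict_phi_2
    = ((PySem.Set.ofList (pvBigrams ("None" :: sent.map pvTag))).filter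
        (fun k => (train_dict_phi_2.map Prod.fst).contains k)).map
        (fun k => (k, ((pvBigrams ("None" :: sent.map pvTag)).count k : Int))) := by
  have htag : pvTag "None_None" = "None" := by decide
  unfold phi_2
  simp only []
  rw [show ("None_None" :: sent).foldl
      (fun acc key => acc ++ [(PySem.List.pyGet? ((PySem.Str.split? key "_").getD []) 1).getD ""])
      ([] : List String)
      = ("None_None" :: sent).map pvTag from by
        simpa [pvTag] using pv_foldl_append_map ("None_None" :: sent) []]
  rw [show (("None_None" :: sent).map pvTag) = "None" :: sent.map pvTag from by
        simp [htag]]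
  set bs := pvBigrams ("None" :: sent.map pvTag) with hbs
  rw [pv_zip_map_bigrams, ← hbs]
  rw [pv_foldl_if_filter_pairs]
  rw [PySem.Dict.items_counter]
  rw [show (List.filter (fun kv => (train_dict_phi_2.map Prod.fst).contains kv.1)
        ((PySem.Set.ofList bs).map (fun k => (k, (bs.count k : Int)))))
      = ((PySem.Set.ofList bs).filter
          (fun k => (train_dict_phi_2.map Prod.fst).contains k)).map
          (fun k => (k, (bs.count k : Int))) from by
        simpa [Function.comp_def]
          using (List.filter_map (f := fun k => (k, (bs.count k : Int)))
            (p := fun kv => (train_dict_phi_2.map Prod.fst).contains kv.1)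
            (l := PySem.Set.ofList bs))]
  rw [PySem.Dict.items_foldl_insert_fresh _ Prod.fst Prod.snd PySem.Dict.empty
      (by intro a _; exact PySem.Dict.contains_empty _)
      (by
        have hmap : (((PySem.Set.ofList bs).filter
            (fun k => (train_dict_phi_2.map Prod.fst).contains k)).map
            (fun k => (k, (bs.count k : Int)))).map Prod.fst
            = (PySem.Set.ofList bs).filter
                (fun k => (train_dict_phi_2.map Prod.fst).contains k) := by
          simp [List.map_map, Function.comp_def]
        rw [hmap]
        exact (PySem.Set.nodup_ofList bs).filter _)]
  simp [Function.comp_def, PySem.Dict.empty]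

theorem pv_b_canon (sent : List String) (train_dict_phi_2 : List (String × Int)) :
    phi_2_alt sent train_dict_phi_2
    = ((PySem.Set.ofList (pvBigrams ("None" :: sent.map pvTag))).filter
        (fun k => (train_dict_phi_2.map Prod.fst).contains k)).map
        (fun k => (k, ((pvBigrams ("None" :: sent.map pvTag)).count k : Int))) := by
  set bs := pvBigrams ("None" :: sent.map pvTag) with hbs
  unfold phi_2_alt
  simp only []
  rw [congrArg PySem.Dict.items (pv_b_loop train_dict_phi_2 sent PySem.Dict.empty "None")]
  rw [← hbs, pv_foldl_if_filter_keys]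
  rw [PySem.Dict.foldl_insert_getD_add_one_eq_counter]
  rw [PySem.Dict.items_counter]
  rw [pv_ofList_filter]
  refine List.map_congr_left ?_
  intro k hk
  have hpk : (train_dict_phi_2.map Prod.fst).contains k = true := (List.mem_filter.mp hk).2
  rw [List.count_filter hpk]

-- ===== VERDICT (by name: the statement is the Claim_ definition above) =====
theorem phi_2_spec : Claim_equal_phi_2 := by
  intro sent train_dict_phi_2 _ _
  unfold Spec_phi_2
  rw [pv_a_canon, pv_b_canon]
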